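-- pv_equiv track=rewrite | github.com/mayavolo/ex8 | nonogram.py | get_intersection_row
-- ===== SOURCE A (Python) =====
-- def get_intersection_row(rows):
--     if len(rows) == 0:
--         return []
--
--     intersection_list = []
--     for index in range(len(rows[0])):
--         start = rows[0][index]
--         same = True
--         for row in rows:
--             if row[index] != start:
--                 same = False
--         if same:
--             intersection_list.append(start)
--         else:
--             intersection_list.append(-1)
--     return intersection_list
-- ===== SOURCE B (Python) =====
-- def get_intersection_row(rows):
--     if not rows:
--         return []
--     merged = list(rows[0])
--     for row in rows[1:]:
--         merged = [m if row[i] == m else -1 for i, m in enumerate(merged)]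
--     return merged
-- ===== Notes on version B (the rewrite author's own statement) =====
-- stated objective: alternative
-- what changed: B replaces A's column-major double loop (for each column, scan all rows against a reference with a flag) by a row-major pairwise reduction: it starts from a copy of the first row and folds each remaining row into the accumulator elementwise (keep the value if equal, else mark -1), so no per-column scan exists.
import Mathlib
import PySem

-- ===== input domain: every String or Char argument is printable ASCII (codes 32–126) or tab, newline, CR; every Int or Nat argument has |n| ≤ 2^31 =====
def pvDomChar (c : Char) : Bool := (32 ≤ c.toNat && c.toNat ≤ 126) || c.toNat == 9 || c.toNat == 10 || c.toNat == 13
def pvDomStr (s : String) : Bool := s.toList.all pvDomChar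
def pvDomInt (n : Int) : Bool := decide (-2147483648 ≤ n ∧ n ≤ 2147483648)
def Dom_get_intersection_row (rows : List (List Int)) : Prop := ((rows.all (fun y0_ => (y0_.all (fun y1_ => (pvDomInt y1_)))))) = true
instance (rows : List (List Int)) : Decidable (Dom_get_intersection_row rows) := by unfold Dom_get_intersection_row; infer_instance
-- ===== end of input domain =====

-- B replaces A's column-major double loop (per-column flag scan against a reference
-- value) by a row-major pairwise reduction: fold each remaining row elementwise into
-- a copy of the first row, marking disagreements -1 (objective: alternative).

-- ===== PORT A =====
def get_intersection_row (rows : List (List Int)) : List Int :=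
  if rows.length == 0 then []
  else
    (PySem.List.pyRange 0 ((PySem.List.pyGetD rows 0 []).length) 1).foldl
      (fun acc index =>
        let start := PySem.List.pyGetD (PySem.List.pyGetD rows 0 []) index 0
        let same := rows.foldl
          (fun same row => if PySem.List.pyGetD row index 0 != start then false else same) true
        acc ++ [if same then start else -1]) []

-- ===== PORT B =====
def get_intersection_row_alt (rows : List (List Int)) : List Int :=
  match rows with
  | [] => []
  | r0 :: rest =>
    rest.foldl (fun merged row =>
      (PySem.List.enumerate merged 0).map (fun im =>
        if PySem.List.pyGetD row im.1 0 == im.2 then im.2 else -1)) r0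

-- ===== PRECONDITION & SPEC =====
-- Pre_ excludes ragged inputs (some row shorter than the first row), on which the
-- Python A raises IndexError.
def Pre_get_intersection_row (rows : List (List Int)) : Prop :=
  ∀ row ∈ rows, (rows.headD []).length ≤ row.length
instance (rows : List (List Int)) : Decidable (Pre_get_intersection_row rows) := by
  unfold Pre_get_intersection_row; infer_instance

def pvWitness_get_intersection_row : List (List Int) := [[1, 2, 3], [1, 5, 3], [1, 2, 3]]

def Spec_get_intersection_row (rows : List (List Int)) (out : List Int) : Prop := out = get_intersection_row_alt rows
instance (rows : List (List Int)) (out : List Int) : Decidable (Spec_get_intersection_row rows out) := by unfold Spec_get_intersection_row; infer_instance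

-- ===== CLAIM (what is proved, stated in full; the proofs are below) =====
def Claim_equal_get_intersection_row : Prop := ∀ (rows : List (List Int)), Dom_get_intersection_row rows → Pre_get_intersection_row rows → Spec_get_intersection_row rows (get_intersection_row rows)

-- ===== LEMMAS AND PROOFS =====

-- B's merge step preserves the length of the accumulator
lemma merge_length (merged : List Int) (row : List Int) :
    ((PySem.List.enumerate merged 0).map (fun im =>
      if PySem.List.pyGetD row im.1 0 == im.2 then im.2 else -1)).length = merged.length := by
  simp [PySem.List.length_enumerate]

-- length of B's fold
lemma foldl_merge_length (rest : List (List Int)) (merged : List Int) :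
    (rest.foldl (fun merged row =>
      (PySem.List.enumerate merged 0).map (fun im =>
        if PySem.List.pyGetD row im.1 0 == im.2 then im.2 else -1)) merged).length
      = merged.length := by
  induction rest generalizing merged with
  | nil => rfl
  | cons r rs ih => rw [List.foldl_cons, ih, merge_length]

-- pointwise characterisation of B's fold
lemma foldl_merge_getElem (rest : List (List Int)) (k : Nat) :
    ∀ (merged : List Int) (hk : k < merged.length),
    (rest.foldl (fun merged row =>
      (PySem.List.enumerate merged 0).map (fun im =>
        if PySem.List.pyGetD row im.1 0 == im.2 then im.2 else -1)) merged)[k]'(by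
          rw [foldl_merge_length]; exact hk)
      = if rest.all (fun row => PySem.List.pyGetD row (k : Int) 0 == merged[k]) then merged[k]
        else -1 := by
  induction rest with
  | nil => intro merged hk; simp
  | cons r rs ih =>
    intro merged hk
    simp only [List.foldl_cons, List.all_cons]
    rw [ih _ (by rw [merge_length]; exact hk)]
    have hget : ∀ h, ((PySem.List.enumerate merged 0).map (fun im =>
        if PySem.List.pyGetD r im.1 0 == im.2 then im.2 else -1))[k]'h
        = if PySem.List.pyGetD r (k : Int) 0 == merged[k] then merged[k] else -1 := by
      intro h
      simp [PySem.List.getElem_enumerate]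
    rw [hget]
    by_cases h : r[k]?.getD 0 = merged[k]
    · simp [h]
    · simp [h]

-- A's inner flag loop computes "b and all row[index] == start"
lemma flag_foldl (rows : List (List Int)) (index start : Int) (b : Bool) :
    rows.foldl (fun same row => if PySem.List.pyGetD row index 0 != start then false else same) b
      = (b && rows.all (fun row => PySem.List.pyGetD row index 0 == start)) := by
  induction rows generalizing b with
  | nil => simp
  | cons r rs ih =>
    simp only [List.foldl_cons, List.all_cons, ih]
    by_cases h : PySem.List.pyGetD r index 0 == start <;>
      cases b <;> simp [bne, h]

theorem get_intersection_row_spec : Claim_equal_get_intersection_row := by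
  intro rows _ hpre
  unfold Spec_get_intersection_row get_intersection_row get_intersection_row_alt
  match rows with
  | [] => simp
  | r0 :: rest =>
    have hcond : (((r0 :: rest).length == 0) : Bool) = false := by simp
    simp only [hcond, Bool.false_eq_true, if_false, PySem.List.pyGetD_zero_cons,
      PySem.List.foldl_append_singleton_eq_map, List.nil_append]
    apply List.ext_getElem
    · rw [List.length_map, PySem.List.length_pyRange_one, foldl_merge_length]; simp
    · intro k h1 h2
      have hk : k < r0.length := by
        have := foldl_merge_length rest r0; omega
      rw [foldl_merge_getElem rest k r0 hk]
      rw [List.getElem_map]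
      have hidx : (PySem.List.pyRange 0 (r0.length : Int) 1)[k]'(by simpa using h1) = (k : Int) := by
        rw [PySem.List.getElem_pyRange_one]; simp
      rw [hidx, flag_foldl]
      have hr0 : PySem.List.pyGetD r0 (k : Int) 0 = r0[k] := by
        simp [PySem.List.pyGetD_natCast, List.getD_eq_getElem?_getD, List.getElem?_eq_getElem hk]
      simp only [List.all_cons, hr0, beq_self_eq_true, Bool.true_and]
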